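-- pv_equiv track=rewrite | github.com/stfxecutables/df-analyze | traffic.py | rename_makes_1
-- ===== SOURCE A (Python) =====
-- def rename_makes_1(s: str) -> str:
--     # These are the common makes, and their most common miss-spellings
--     # fmt: off
--     spellings = {
--         "acura": ("acur",),
--         "buick": ("buic",),
--         "cadillac": ("cad", "cadi", "cadilac"),
--         "chevy": ("chev", "cheverolet", "chevorlet", "chevrolet"),
--         "chrysler": ("chry", "chrys", "chrystler", "crysler", "cry"),
--         "dodge": ("dodg", "ram"),
--         "freightliner": ("frht",),
--         "honda": ("hinda", "hino", "hond"),
--         "hummer": ("humm", "hyun", "hyund", "hyunda", "hyundai", "hyundi", "hyundia"),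
--         "infinity": ("inf", "infi", "infin", "infiniti"),
--         "international": ("intl",),
--         "isuzu": ("isu", "isuz"),
--         "jaguar": ("jag", "jagu"),
--         "kawasaki": ("kawk",),
--         "kenworth": ("kw",),
--         "landrover": ("land rover", "lndr"),
--         "lexus": ("lex", "lexs", "lexu"),
--         "lincoln": ("linc",),
--         "mazda": ("maz", "mazada", "mazd"),
--         "mercury": ("merc",),
--         "mercedes": ("mercedes benz", "mercedes-benz", "mercedez", "merz", "merz benz", "benz",),
--         "mini": ("mini cooper", "mnni"),
--         "mitsubishi": ("mits", "mitsu", "mitz"),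
--         "nissan": ("niss", "nissa", "nissian"),
--         "none": ("unknown",),
--         "oldsmobile": ("olds",),
--         "peterbilt": ("pete", "peterbuilt", "ptrb"),
--         "plymouth": ("plym",),
--         "pontiac": ("pont",),
--         "porsche": ("pors",),
--         "range rover": ("rang",),
--         "saab": ("saa",),
--         "saturn": ("satr", "satu", "strn"),
--         "scion": ("scio",),
--         "subaru": ("sub", "suba", "subu", "suburu"),
--         "suzuki": ("suzi", "suzu"),
--         "taotao": ("tao tao",),
--         "tesla": ("tesl",),
--         "toyota": ("toty", "toy", "toyo", "toyot", "toyt", "toyta", "toytoa"),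
--         "volkswagen": ("volk", "volks", "volkswagon", "vw"),
--         "volvo": ("volv",),
--         "yamaha": ("yama",),
--     }
--     # fmt: on
--     for correct, misspellings in spellings.items():
--         if s in misspellings:
--             return correct
--     return s
-- ===== SOURCE B (Python) =====
-- # B: the table is a tuple of compact colon/comma-separated lines, parsed once
-- # at import into a flat misspelling->make dict; the function body is a single
-- # dict lookup with the input itself as default.
-- _TABLE = (
--     "acura:acur",
--     "buick:buic",
--     "cadillac:cad,cadi,cadilac",
--     "chevy:chev,cheverolet,chevorlet,chevrolet",
--     "chrysler:chry,chrys,chrystler,crysler,cry",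
--     "dodge:dodg,ram",
--     "freightliner:frht",
--     "honda:hinda,hino,hond",
--     "hummer:humm,hyun,hyund,hyunda,hyundai,hyundi,hyundia",
--     "infinity:inf,infi,infin,infiniti",
--     "international:intl",
--     "isuzu:isu,isuz",
--     "jaguar:jag,jagu",
--     "kawasaki:kawk",
--     "kenworth:kw",
--     "landrover:land rover,lndr",
--     "lexus:lex,lexs,lexu",
--     "lincoln:linc",
--     "mazda:maz,mazada,mazd",
--     "mercury:merc",
--     "mercedes:mercedes benz,mercedes-benz,mercedez,merz,merz benz,benz",
--     "mini:mini cooper,mnni",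
--     "mitsubishi:mits,mitsu,mitz",
--     "nissan:niss,nissa,nissian",
--     "none:unknown",
--     "oldsmobile:olds",
--     "peterbilt:pete,peterbuilt,ptrb",
--     "plymouth:plym",
--     "pontiac:pont",
--     "porsche:pors",
--     "range rover:rang",
--     "saab:saa",
--     "saturn:satr,satu,strn",
--     "scion:scio",
--     "subaru:sub,suba,subu,suburu",
--     "suzuki:suzi,suzu",
--     "taotao:tao tao",
--     "tesla:tesl",
--     "toyota:toty,toy,toyo,toyot,toyt,toyta,toytoa",
--     "volkswagen:volk,volks,volkswagon,vw",
--     "volvo:volv",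
--     "yamaha:yama",
-- )
--
--
-- def _build_reverse(lines) -> dict:
--     rev = {}
--     for line in lines:
--         make, rest = line.split(":", 1)
--         for miss in rest.split(","):
--             rev[miss] = make
--     return rev
--
--
-- _REVERSE = _build_reverse(_TABLE)
--
--
-- def rename_makes_1(s: str) -> str:
--     return _REVERSE.get(s, s)
-- ===== Notes on version B (the rewrite author's own statement) =====
-- stated objective: idiomatic
-- what changed: Replaced the per-call scan of the nested make->misspellings dict with a flat misspelling->make dict built once at import by parsing a compact colon/comma-separated line table, so the function body is a single dict lookup with the input as default.
import Mathlib
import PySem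

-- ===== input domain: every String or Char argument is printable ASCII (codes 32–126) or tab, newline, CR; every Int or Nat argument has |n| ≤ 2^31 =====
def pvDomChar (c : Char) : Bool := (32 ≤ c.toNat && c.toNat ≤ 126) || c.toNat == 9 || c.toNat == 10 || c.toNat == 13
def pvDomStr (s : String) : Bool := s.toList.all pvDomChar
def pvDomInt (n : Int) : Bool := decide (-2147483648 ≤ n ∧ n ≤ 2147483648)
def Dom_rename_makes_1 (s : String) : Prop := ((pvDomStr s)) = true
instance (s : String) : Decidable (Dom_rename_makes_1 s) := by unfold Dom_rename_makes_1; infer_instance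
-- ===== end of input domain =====

-- B keeps the table as a compact colon/comma-separated line table, parses it
-- once into a flat misspelling → make dict, and the body is a single lookup
-- with the input as default (idiomatic; no scan of nested tuples per call).

-- ===== PORT A =====
-- A's nested table: canonical make ↦ tuple of misspellings, in source order.
def pvSpellings : List (String × List String) := [
    ("acura", ["acur"]),
    ("buick", ["buic"]),
    ("cadillac", ["cad", "cadi", "cadilac"]),
    ("chevy", ["chev", "cheverolet", "chevorlet", "chevrolet"]),
    ("chrysler", ["chry", "chrys", "chrystler", "crysler", "cry"]),
    ("dodge", ["dodg", "ram"]),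
    ("freightliner", ["frht"]),
    ("honda", ["hinda", "hino", "hond"]),
    ("hummer", ["humm", "hyun", "hyund", "hyunda", "hyundai", "hyundi", "hyundia"]),
    ("infinity", ["inf", "infi", "infin", "infiniti"]),
    ("international", ["intl"]),
    ("isuzu", ["isu", "isuz"]),
    ("jaguar", ["jag", "jagu"]),
    ("kawasaki", ["kawk"]),
    ("kenworth", ["kw"]),
    ("landrover", ["land rover", "lndr"]),
    ("lexus", ["lex", "lexs", "lexu"]),
    ("lincoln", ["linc"]),
    ("mazda", ["maz", "mazada", "mazd"]),
    ("mercury", ["merc"]),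
    ("mercedes", ["mercedes benz", "mercedes-benz", "mercedez", "merz", "merz benz", "benz"]),
    ("mini", ["mini cooper", "mnni"]),
    ("mitsubishi", ["mits", "mitsu", "mitz"]),
    ("nissan", ["niss", "nissa", "nissian"]),
    ("none", ["unknown"]),
    ("oldsmobile", ["olds"]),
    ("peterbilt", ["pete", "peterbuilt", "ptrb"]),
    ("plymouth", ["plym"]),
    ("pontiac", ["pont"]),
    ("porsche", ["pors"]),
    ("range rover", ["rang"]),
    ("saab", ["saa"]),
    ("saturn", ["satr", "satu", "strn"]),
    ("scion", ["scio"]),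
    ("subaru", ["sub", "suba", "subu", "suburu"]),
    ("suzuki", ["suzi", "suzu"]),
    ("taotao", ["tao tao"]),
    ("tesla", ["tesl"]),
    ("toyota", ["toty", "toy", "toyo", "toyot", "toyt", "toyta", "toytoa"]),
    ("volkswagen", ["volk", "volks", "volkswagon", "vw"]),
    ("volvo", ["volv"]),
    ("yamaha", ["yama"])]

-- the 'for correct, misspellings in spellings.items(): if s in misspellings: return correct' loop
def pvScanA (s : String) : List (String × List String) → String
  | [] => s
  | (correct, misspellings) :: rest =>
      if s ∈ misspellings then correct else pvScanA s rest

def rename_makes_1 (s : String) : String := pvScanA s pvSpellings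

-- ===== PORT B =====
-- Source B's module-level tuple _TABLE, one colon/comma-separated line per make.
def pvTable : List String := [
    "acura:acur",
    "buick:buic",
    "cadillac:cad,cadi,cadilac",
    "chevy:chev,cheverolet,chevorlet,chevrolet",
    "chrysler:chry,chrys,chrystler,crysler,cry",
    "dodge:dodg,ram",
    "freightliner:frht",
    "honda:hinda,hino,hond",
    "hummer:humm,hyun,hyund,hyunda,hyundai,hyundi,hyundia",
    "infinity:inf,infi,infin,infiniti",
    "international:intl",
    "isuzu:isu,isuz",
    "jaguar:jag,jagu",
    "kawasaki:kawk",
    "kenworth:kw",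
    "landrover:land rover,lndr",
    "lexus:lex,lexs,lexu",
    "lincoln:linc",
    "mazda:maz,mazada,mazd",
    "mercury:merc",
    "mercedes:mercedes benz,mercedes-benz,mercedez,merz,merz benz,benz",
    "mini:mini cooper,mnni",
    "mitsubishi:mits,mitsu,mitz",
    "nissan:niss,nissa,nissian",
    "none:unknown",
    "oldsmobile:olds",
    "peterbilt:pete,peterbuilt,ptrb",
    "plymouth:plym",
    "pontiac:pont",
    "porsche:pors",
    "range rover:rang",
    "saab:saa",
    "saturn:satr,satu,strn",
    "scion:scio",
    "subaru:sub,suba,subu,suburu",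
    "suzuki:suzi,suzu",
    "taotao:tao tao",
    "tesla:tesl",
    "toyota:toty,toy,toyo,toyot,toyt,toyta,toytoa",
    "volkswagen:volk,volks,volkswagon,vw",
    "volvo:volv",
    "yamaha:yama"]

-- _build_reverse: for each line, 'make, rest = line.split(":", 1)', then each
-- comma-separated misspelling is inserted into the dict.  The '_ => rev' arms
-- are where Python's unpacking / split would raise; the constant never hits them.
def pvBuildReverse (lines : List String) : PySem.Dict String String :=
  lines.foldl (fun rev line =>
    match PySem.Str.splitMax? line ":" 1 with
    | some [make, rest] =>
        match PySem.Str.split? rest "," with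
        | some misses => misses.foldl (fun rev miss => rev.insert miss make) rev
        | none => rev
    | _ => rev) PySem.Dict.empty

def pvReverseB : PySem.Dict String String := pvBuildReverse pvTable

def rename_makes_1_alt (s : String) : String := pvReverseB.getD s s

-- ===== PRECONDITION & SPEC =====
def Spec_rename_makes_1 (s : String) (out : String) : Prop := out = rename_makes_1_alt s
instance (s : String) (out : String) : Decidable (Spec_rename_makes_1 s out) := by unfold Spec_rename_makes_1; infer_instance

-- ===== CLAIM (what is proved, stated in full; the proofs are below) =====
def Claim_equal_rename_makes_1 : Prop := ∀ (s : String), Dom_rename_makes_1 s → Spec_rename_makes_1 s (rename_makes_1 s)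

-- ===== LEMMAS AND PROOFS =====

-- first-match lookup with default in an association list
def pvLookupD (s : String) : List (String × String) → String
  | [] => s
  | (k, v) :: rest => if k == s then v else pvLookupD s rest

theorem pvGetD_eq_lookupD (s : String) (l : List (String × String)) :
    (PySem.Dict.mk l).getD s s = pvLookupD s l := by
  induction l with
  | nil => rfl
  | cons p rest ih =>
    obtain ⟨k, v⟩ := p
    simp [PySem.Dict.getD, PySem.Dict.get?_mk_cons, pvLookupD]
    split <;> simp_all [PySem.Dict.getD]

-- looking up s in the inverted block for one make, then falling through
theorem pvLookupD_block (s c : String) (ms : List String) (r : List (String × String)) :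
    pvLookupD s (ms.map (fun m => (m, c)) ++ r) =
      if s ∈ ms then c else pvLookupD s r := by
  induction ms with
  | nil => simp
  | cons m ms ih =>
    by_cases h : m = s
    · simp [pvLookupD, h]
    · have : ¬ (s = m) := fun e => h e.symm
      simp [pvLookupD, h, this, ih]

-- A's scan over the nested table = first-match lookup in its flattening
theorem pvScanA_eq_lookupD (s : String) (tbl : List (String × List String)) :
    pvScanA s tbl =
      pvLookupD s (tbl.flatMap (fun p => p.2.map (fun m => (m, p.1)))) := by
  induction tbl with
  | nil => rfl
  | cons p rest ih =>
    obtain ⟨c, ms⟩ := p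
    simp only [pvScanA, List.flatMap_cons, pvLookupD_block]
    split <;> simp [ih]

-- B's parsed dict IS the flattening of A's nested table (a closed computation)
set_option maxRecDepth 20000 in
set_option maxHeartbeats 2000000 in
theorem pvReverseB_eq_flatten :
    pvReverseB = PySem.Dict.mk
      (pvSpellings.flatMap (fun p => p.2.map (fun m => (m, p.1)))) := by
  decide

-- ===== VERDICT (by name: the statement is the Claim_ definition above) =====
theorem rename_makes_1_spec : Claim_equal_rename_makes_1 := by
  intro s _
  show rename_makes_1 s = rename_makes_1_alt s
  rw [rename_makes_1, rename_makes_1_alt, pvReverseB_eq_flatten,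
      pvGetD_eq_lookupD, pvScanA_eq_lookupD]
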